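-- pv_equiv track=rewrite | github.com/shriraj-chinchwade-bbi/Assessment | assignment2/file21.py | smallnum2
-- ===== SOURCE A (Python) =====
-- def smallnum2(nums):
--     sorted_nums=sorted(nums)
--     count={}
--     for i, j in enumerate(sorted_nums):
--         if j not in count:
--             count[j]=i
--     ans2=[count[j] for j in nums]
--     return ans2
-- ===== SOURCE B (Python) =====
-- def smallnum2(nums):
--     return [sum(1 for y in nums if y < x) for x in nums]
-- ===== Notes on version B (the rewrite author's own statement) =====
-- stated objective: simpler
-- what changed: Replaces the sort-then-first-index dictionary with a direct double scan: each element's answer is the count of strictly smaller elements in the list.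
import Mathlib
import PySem

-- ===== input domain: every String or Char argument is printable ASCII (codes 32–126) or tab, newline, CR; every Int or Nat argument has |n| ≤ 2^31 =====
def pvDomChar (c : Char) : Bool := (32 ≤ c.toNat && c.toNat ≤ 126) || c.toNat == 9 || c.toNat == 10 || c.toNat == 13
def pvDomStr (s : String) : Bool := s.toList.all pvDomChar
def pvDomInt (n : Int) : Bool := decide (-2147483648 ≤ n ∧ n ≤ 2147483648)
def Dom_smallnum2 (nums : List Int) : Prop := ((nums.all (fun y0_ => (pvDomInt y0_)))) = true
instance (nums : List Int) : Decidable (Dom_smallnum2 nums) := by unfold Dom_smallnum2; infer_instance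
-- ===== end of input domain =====

-- B replaces A's sort + first-occurrence-index dictionary with a direct double scan
-- (count of strictly smaller elements); same return value, proved below.

-- ===== PORT A =====
-- count[j] in the comprehension can never raise (every j of nums is a key of count),
-- so the lookup is ported as get? with a .getD 0 on the (unreachable) none branch.
def smallnum2 (nums : List Int) : List Int :=
  let sorted_nums := PySem.List.sorted nums (fun x => x)
  let count := (PySem.List.enumerate sorted_nums).foldl
    (fun d (p : Int × Int) => if !(d.contains p.2) then d.insert p.2 p.1 else d)
    PySem.Dict.empty
  nums.map (fun j => (PySem.Dict.get? count j).getD 0)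

-- ===== PORT B =====
def smallnum2_alt (nums : List Int) : List Int :=
  nums.map (fun x => nums.foldl (fun acc y => if y < x then acc + 1 else acc) (0 : Int))

-- ===== PRECONDITION & SPEC =====
def Spec_smallnum2 (nums : List Int) (out : List Int) : Prop := out = smallnum2_alt nums
instance (nums : List Int) (out : List Int) : Decidable (Spec_smallnum2 nums out) := by unfold Spec_smallnum2; infer_instance

-- ===== CLAIM (what is proved, stated in full; the proofs are below) =====
def Claim_equal_smallnum2 : Prop := ∀ (nums : List Int), Dom_smallnum2 nums → Spec_smallnum2 nums (smallnum2 nums)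

-- ===== LEMMAS AND PROOFS =====

-- A's dictionary loop over a sorted list: the stored index of a present key j is
-- (start index k) + (number of elements strictly below j).
lemma loop_get (s : List Int) (k : Int) (d : PySem.Dict Int Int) (j : Int)
    (hs : s.Pairwise (· ≤ ·)) :
    PySem.Dict.get?
      ((PySem.List.enumerate s k).foldl
        (fun d (p : Int × Int) => if !(d.contains p.2) then d.insert p.2 p.1 else d) d) j =
    (match PySem.Dict.get? d j with
     | some v => some v
     | none => if j ∈ s then some (k + ((s.filter (fun y => y < j)).length : Int)) else none) := by
  induction s generalizing k d with
  | nil => cases h : PySem.Dict.get? d j <;> simp [PySem.List.enumerate_nil, h]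
  | cons a t ih =>
    rw [List.pairwise_cons] at hs
    obtain ⟨ha, ht⟩ := hs
    rw [PySem.List.enumerate_cons, List.foldl_cons, ih _ _ ht]
    by_cases hca : d.contains a = true
    · -- a already present: dict unchanged this step
      rw [hca]
      simp only [Bool.not_true, Bool.false_eq_true, if_false]
      cases h : PySem.Dict.get? d j with
      | some v => simp
      | none =>
        have hja : j ≠ a := by
          intro he; subst he
          rw [PySem.Dict.contains_eq_isSome_get?, h] at hca; simp at hca
        simp only [List.mem_cons, List.filter_cons]
        by_cases hjt : j ∈ t
        · have halt : a < j := lt_of_le_of_ne (ha j hjt) (Ne.symm hja)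
          simp [hjt, hja, halt]
          omega
        · simp [hjt, hja]
    · -- a fresh: inserted with index k
      rw [Bool.not_eq_true] at hca
      rw [hca]
      simp only [Bool.not_false, if_true]
      have hdn : PySem.Dict.get? d a = none := by
        rw [PySem.Dict.contains_eq_isSome_get?] at hca
        cases h : PySem.Dict.get? d a <;> simp [h] at hca ⊢
      by_cases hja : j = a
      · subst hja
        rw [PySem.Dict.get?_insert_self, hdn]
        have hnone : (t.filter (fun y => y < j)).length = 0 := by
          rw [List.length_eq_zero_iff, List.filter_eq_nil_iff]
          intro y hy
          simp [not_lt.mpr (ha y hy)]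
        simp [hnone]
      · rw [PySem.Dict.get?_insert, if_neg hja]
        cases h : PySem.Dict.get? d j with
        | some v => simp
        | none =>
          simp only [List.mem_cons, List.filter_cons]
          by_cases hjt : j ∈ t
          · have halt : a < j := lt_of_le_of_ne (ha j hjt) (Ne.symm hja)
            simp [hjt, hja, halt]
            omega
          · simp [hjt, hja]

-- B's inner fold counts the elements strictly below x.
lemma foldl_count (x : Int) (l : List Int) (acc : Int) :
    l.foldl (fun acc y => if y < x then acc + 1 else acc) acc =
      acc + ((l.filter (fun y => y < x)).length : Int) := by
  induction l generalizing acc with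
  | nil => simp
  | cons a t ih =>
    simp only [List.foldl_cons, List.filter_cons]
    by_cases h : a < x
    · rw [ih]; simp [h]; omega
    · rw [ih]; simp [h]

-- ===== VERDICT (by name: the statement is the Claim_ definition above) =====
theorem smallnum2_spec : Claim_equal_smallnum2 := by
  intro nums _
  unfold Spec_smallnum2 smallnum2 smallnum2_alt
  apply List.map_congr_left
  intro j hj
  have hperm := PySem.List.sorted_perm nums (fun x => x) false
  have hmem : j ∈ PySem.List.sorted nums (fun x => x) :=
    (PySem.List.mem_sorted _ _ _ _).mpr hj
  rw [loop_get _ 0 _ j (PySem.List.sorted_pairwise nums (fun x => x)),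
      PySem.Dict.get?_empty, foldl_count]
  simp [hmem, (hperm.filter (fun y => y < j)).length_eq]
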